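-- pv_equiv track=rewrite | github.com/ClawBio/ClawBio | skills/dnasp/dnasp.py | _get_biallelic_positions
-- ===== SOURCE A (Python) =====
-- from collections import Counter
--
-- _GAP_CHARS = frozenset("-?N")
--
-- def _get_biallelic_positions(seqs: list[str]) -> list[tuple[int, str, str]]:
--     """Return list of (position, minor_allele, major_allele) for biallelic sites.
--
--     Only strictly biallelic sites (exactly 2 nucleotide states, no gaps) are
--     returned.  Sites with gaps in any sequence are excluded (complete deletion).
--     Multiallelic sites (3+ states) are excluded.
--     """
--     if not seqs:
--         return []
--     L = len(seqs[0])
--     result = []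
--     for pos in range(L):
--         col = [s[pos] for s in seqs]
--         if any(c in _GAP_CHARS for c in col):
--             continue
--         counts: Counter = Counter(col)
--         if len(counts) != 2:
--             continue
--         alleles = sorted(counts.keys(), key=lambda a: counts[a])
--         minor, major = alleles[0], alleles[1]
--         result.append((pos, minor, major))
--     return result
-- ===== SOURCE B (Python) =====
-- _GAP_CHARS = frozenset("-?N")
--
-- def _get_biallelic_positions(seqs: list[str]) -> list[tuple[int, str, str]]:
--     """Row-major re-implementation: one pass over the sequences building
--     per-position count dicts and gap flags, then one final pass over positions."""
--     if not seqs: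
--         return []
--     L = len(seqs[0])
--     counts = [{} for _ in range(L)]
--     gap = [False] * L
--     for s in seqs:
--         for pos in range(L):
--             ch = s[pos]
--             if ch in _GAP_CHARS:
--                 gap[pos] = True
--             c = counts[pos]
--             c[ch] = c.get(ch, 0) + 1
--     result = []
--     for pos in range(L):
--         if gap[pos]:
--             continue
--         c = counts[pos]
--         if len(c) != 2:
--             continue
--         minor, major = sorted(c, key=c.get)
--         result.append((pos, minor, major))
--     return result
-- ===== Notes on version B (the rewrite author's own statement) =====
-- stated objective: alternative
-- what changed: Column-major scan (rebuild each column and a fresh Counter per position) replaced by a single row-major pass over the sequences that maintains per-position count dicts and gap flags, followed by one final pass over positions.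
import Mathlib
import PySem

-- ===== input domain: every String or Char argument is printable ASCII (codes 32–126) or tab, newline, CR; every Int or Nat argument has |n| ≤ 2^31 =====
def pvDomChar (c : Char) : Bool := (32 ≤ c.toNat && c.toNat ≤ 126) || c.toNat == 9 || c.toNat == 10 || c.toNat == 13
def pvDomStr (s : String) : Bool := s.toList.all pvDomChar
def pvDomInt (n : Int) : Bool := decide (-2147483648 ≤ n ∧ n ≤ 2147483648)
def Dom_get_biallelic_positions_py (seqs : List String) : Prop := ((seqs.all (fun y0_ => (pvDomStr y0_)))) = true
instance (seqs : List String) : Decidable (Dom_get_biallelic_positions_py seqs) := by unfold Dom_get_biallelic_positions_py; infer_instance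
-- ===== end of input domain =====

-- B builds per-position count dicts and gap flags in one row-major pass over the
-- sequences (alternative decomposition: column-major in A vs row-major in B).

-- ===== PORT A =====
-- c ∈ _GAP_CHARS
def pvGap (c : Char) : Bool := c ∈ ['-', '?', 'N']

-- s[pos] for a valid index (Pre_ guarantees the index is in range; ' ' is never read inside Pre_)
def pvCharAt (s : String) (pos : Int) : Char := (PySem.Str.pyGet? s pos).getD ' '

def get_biallelic_positions_py (seqs : List String) : List (Int × String × String) :=
  if seqs = [] then []
  else
    let L : Int := PySem.Str.len (seqs.headD "")
    (PySem.List.pyRange 0 L 1).foldl (fun result pos =>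
      let col : List Char := seqs.map (fun s => pvCharAt s pos)
      if col.any pvGap then result
      else
        let counts : PySem.Dict Char Int := PySem.Dict.counter col
        if counts.size ≠ 2 then result
        else
          let alleles := PySem.List.sorted counts.keys (fun a => counts.getD a 0) false
          result ++ [(pos, String.ofList [alleles.getD 0 ' '], String.ofList [alleles.getD 1 ' '])]) []

-- ===== PORT B =====
def get_biallelic_positions_py_alt (seqs : List String) : List (Int × String × String) :=
  if seqs = [] then []
  else
    let L : Int := PySem.Str.len (seqs.headD "")
    let counts0 : List (PySem.Dict Char Int) := List.replicate L.toNat PySem.Dict.empty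
    let gap0 : List Bool := List.replicate L.toNat false
    let st := seqs.foldl (fun st s =>
        (st.1.mapIdx (fun pos d =>
            let ch := pvCharAt s (pos : Int)
            d.insert ch (d.getD ch 0 + 1)),
         st.2.mapIdx (fun pos g =>
            let ch := pvCharAt s (pos : Int)
            g || pvGap ch))) (counts0, gap0)
    (PySem.List.pyRange 0 L 1).foldl (fun result pos =>
      if PySem.List.pyGetD st.2 pos false then result
      else
        let c := PySem.List.pyGetD st.1 pos PySem.Dict.empty
        if c.size ≠ 2 then result
        else
          match PySem.List.sorted c.keys (fun a => c.getD a 0) false with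
          | [minor, major] => result ++ [(pos, String.ofList [minor], String.ofList [major])]
          | _ => result) []

-- ===== PRECONDITION & SPEC =====
-- Pre_ excludes inputs where some sequence is shorter than seqs[0]: there A (and B) raise IndexError.
def Pre_get_biallelic_positions_py (seqs : List String) : Prop :=
  ∀ s ∈ seqs, PySem.Str.len (seqs.headD "") ≤ PySem.Str.len s
instance (seqs : List String) : Decidable (Pre_get_biallelic_positions_py seqs) := by
  unfold Pre_get_biallelic_positions_py; infer_instance

def pvWitness_get_biallelic_positions_py : List String := ["ACGT", "AGGT", "ACGT"]

def Spec_get_biallelic_positions_py (seqs : List String) (out : List (Int × String × String)) : Prop := out = get_biallelic_positions_py_alt seqs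
instance (seqs : List String) (out : List (Int × String × String)) : Decidable (Spec_get_biallelic_positions_py seqs out) := by unfold Spec_get_biallelic_positions_py; infer_instance

-- ===== CLAIM (what is proved, stated in full; the proofs are below) =====
def Claim_equal_get_biallelic_positions_py : Prop := ∀ (seqs : List String), Dom_get_biallelic_positions_py seqs → Pre_get_biallelic_positions_py seqs → Spec_get_biallelic_positions_py seqs (get_biallelic_positions_py seqs)

-- ===== LEMMAS AND PROOFS =====

-- the element at index i of a fold of pointwise (mapIdx) updates is the fold of the column at i
lemma foldl_mapIdx_getElem {α β : Type} (ss : List β) (f : Nat → α → β → α) :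
    ∀ (init : List α) (i : Nat) (hi : i < init.length),
    ∃ h : i < (ss.foldl (fun st s => st.mapIdx (fun pos x => f pos x s)) init).length,
      (ss.foldl (fun st s => st.mapIdx (fun pos x => f pos x s)) init)[i]'h
        = ss.foldl (fun x s => f i x s) (init[i]'hi) := by
  induction ss with
  | nil => intro init i hi; exact ⟨hi, rfl⟩
  | cons s t ih =>
    intro init i hi
    simp only [List.foldl_cons]
    obtain ⟨h, he⟩ := ih (init.mapIdx (fun pos x => f pos x s)) i (by simpa using hi)
    exact ⟨h, by rw [he]; simp⟩

lemma foldl_or_any {β : Type} (l : List β) (p : β → Bool) :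
    ∀ b : Bool, l.foldl (fun g x => g || p x) b = (b || l.any p) := by
  induction l with
  | nil => simp
  | cons x t ih => intro b; simp [ih, Bool.or_assoc]

-- a sorted list of length two, read through getD, is its pattern match
lemma two_elem_getD {α : Type} [Inhabited α] (l : List α) (h : l.length = 2) (d : α) :
    l = [l.getD 0 d, l.getD 1 d] := by
  match l, h with
  | [a, b], _ => rfl

lemma pvCounter_size_keys (d : PySem.Dict Char Int) : d.keys.length = PySem.Dict.size d := by
  simp [PySem.Dict.keys, PySem.Dict.size]

-- ===== VERDICT (by name: the statement is the Claim_ definition above) =====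
theorem get_biallelic_positions_py_spec : Claim_equal_get_biallelic_positions_py := by
  intro seqs _ _
  unfold Spec_get_biallelic_positions_py get_biallelic_positions_py get_biallelic_positions_py_alt
  by_cases hnil : seqs = []
  · simp [hnil]
  · simp only [if_neg hnil]
    rw [PySem.List.foldl_prod_mk
      (f := fun (d : List (PySem.Dict Char Int)) s => d.mapIdx (fun pos d =>
            d.insert (pvCharAt s (pos : Int)) (d.getD (pvCharAt s (pos : Int)) 0 + 1)))
      (g := fun (g : List Bool) s => g.mapIdx (fun pos g => g || pvGap (pvCharAt s (pos : Int))))]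
    apply PySem.List.foldl_congr_mem
    intro acc pos hpos
    set L : Int := PySem.Str.len (seqs.headD "") with hL
    have hposr := (PySem.List.mem_pyRange_one).1 hpos
    have h0L : (0:Int) <= L := by
      simp only [hL, PySem.Str.len]; positivity
    have hposn : pos = ((pos.toNat : Nat) : Int) := by omega
    have hlen : pos.toNat < L.toNat := by omega
    -- the gap flag at pos
    obtain hg := foldl_mapIdx_getElem seqs
      (fun pos (g : Bool) s => g || pvGap (pvCharAt s (pos : Int)))
      (List.replicate L.toNat false) pos.toNat (by simpa using hlen)
    obtain hc := foldl_mapIdx_getElem seqs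
      (fun pos (d : PySem.Dict Char Int) s =>
        d.insert (pvCharAt s (pos : Int)) (d.getD (pvCharAt s (pos : Int)) 0 + 1))
      (List.replicate L.toNat PySem.Dict.empty) pos.toNat (by simpa using hlen)
    obtain ⟨hg1, hg2⟩ := hg
    obtain ⟨hc1, hc2⟩ := hc
    rw [hposn, PySem.List.pyGetD_natCast, PySem.List.pyGetD_natCast,
        List.getD_eq_getElem _ _ hg1, List.getD_eq_getElem _ _ hc1, hg2, hc2]
    simp only [List.getElem_replicate]
    rw [foldl_or_any, Bool.false_or]
    have hcnt : seqs.foldl (fun (d : PySem.Dict Char Int) s =>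
        d.insert (pvCharAt s ((pos.toNat : Nat) : Int)) (d.getD (pvCharAt s ((pos.toNat : Nat) : Int)) 0 + 1))
        PySem.Dict.empty
        = PySem.Dict.counter (seqs.map (fun s => pvCharAt s ((pos.toNat : Nat) : Int))) := by
      rw [← PySem.Dict.foldl_insert_getD_add_one_eq_counter, List.foldl_map]
    rw [hcnt]
    have hany : seqs.any (fun s => pvGap (pvCharAt s ((pos.toNat : Nat) : Int)))
        = (seqs.map (fun s => pvCharAt s ((pos.toNat : Nat) : Int))).any pvGap := by
      rw [List.any_map]; rfl
    rw [hany]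
    set col := seqs.map (fun s => pvCharAt s ((pos.toNat : Nat) : Int)) with hcol
    by_cases hgap : col.any pvGap
    · simp [hgap]
    · simp only [if_neg hgap]
      set counts := PySem.Dict.counter col with hcts
      by_cases hsz : PySem.Dict.size counts ≠ 2
      · simp [hsz]
      · simp only [if_neg hsz]
        rw [not_ne_iff] at hsz
        have hslen : (PySem.List.sorted counts.keys (fun a => counts.getD a 0) false).length = 2 := by
          rw [PySem.List.length_sorted, pvCounter_size_keys, hsz]
        set al := PySem.List.sorted counts.keys (fun a => counts.getD a 0) false with hal
        rw [two_elem_getD al hslen ' ']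
        simp
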